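-- pv_equiv track=rewrite | github.com/lion1735/Algorithm | PCCP_01.py | solution
-- ===== SOURCE A (Python) =====
-- def solution(input_string):
--     dic ={}
--     answer = []
--     prev = ''
--     for char in input_string:
--         if char == prev:
--             continue
--         if char not in dic:
--             dic[char] = 1
--         else:
--             dic[char]+=1
--             if dic[char] == 2:
--                 answer.append(char)
--         prev = char
--     if len(answer) == 0:
--         return 'N'
--     else:
--         answer.sort()
--         return ''.join(answer)
-- ===== SOURCE B (Python) =====
-- def solution(input_string):
--     # For each candidate character (distinct chars, in sorted order), count the
--     # positions that START a run of that character; keep those with >= 2 run starts.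
--     n = len(input_string)
--     result = ''.join(
--         c for c in sorted(set(input_string))
--         if sum(1 for i in range(n)
--                if input_string[i] == c and (i == 0 or input_string[i - 1] != c)) >= 2)
--     return result if result else 'N'
-- ===== Notes on version B (the rewrite author's own statement) =====
-- stated objective: alternative
-- what changed: A's single stateful scan with a run-count dictionary that appends a char the moment its count hits 2 is replaced by a candidate-driven nested search: for each distinct character in sorted order, count the positions that start a run of it (s[i]==c and (i==0 or s[i-1]!=c)) and keep chars with at least two run starts; no dictionary and no answer accumulation during the scan.
import Mathlib
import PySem

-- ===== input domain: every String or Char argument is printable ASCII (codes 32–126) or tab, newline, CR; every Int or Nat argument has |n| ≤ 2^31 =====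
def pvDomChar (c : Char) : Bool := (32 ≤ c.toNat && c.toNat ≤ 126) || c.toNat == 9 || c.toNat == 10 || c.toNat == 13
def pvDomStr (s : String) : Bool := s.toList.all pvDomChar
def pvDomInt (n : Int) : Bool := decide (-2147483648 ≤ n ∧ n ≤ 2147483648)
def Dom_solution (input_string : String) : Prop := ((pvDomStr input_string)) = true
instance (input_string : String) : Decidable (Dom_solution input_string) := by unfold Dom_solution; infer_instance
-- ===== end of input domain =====

-- B replaces A's stateful dictionary scan by a candidate-driven search: for each
-- distinct character in sorted order it counts that character's run starts directly.


-- ===== PORT A =====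
-- A-side helper: the body of A's single for-loop; state = (dic, answer, prev),
-- prev is Option Char (none models Python's initial '').
def aStep (acc : PySem.Dict Char Int × List Char × Option Char) (char : Char) :
    PySem.Dict Char Int × List Char × Option Char :=
  if acc.2.2 = some char then acc
  else if acc.1.contains char = false then (acc.1.insert char 1, acc.2.1, some char)
  else
    let dic' := acc.1.modify char 0 (· + 1)
    if dic'.getD char 0 = 2 then (dic', acc.2.1 ++ [char], some char)
    else (dic', acc.2.1, some char)

def solution (input_string : String) : String :=
  let r := input_string.toList.foldl aStep (PySem.Dict.empty, [], none)
  if r.2.1.length = 0 then "N"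
  else String.ofList (PySem.List.sorted r.2.1 (fun x => x) false)

-- ===== PORT B =====
-- B-side helper: number of positions i that start a run of c
-- (the inner generator 'sum(1 for i in range(n) if s[i] == c and (i == 0 or s[i-1] != c))').
def bStarts (l : List Char) (c : Char) : Nat :=
  (List.range l.length).countP
    (fun i => decide (l[i]? = some c ∧ (i = 0 ∨ l[i-1]? ≠ some c)))

def solution_alt (input_string : String) : String :=
  let l := input_string.toList
  let result := (PySem.List.sorted (PySem.Set.ofList l) (fun x => x) false).filter
    (fun c => decide (2 ≤ bStarts l c))
  if result ≠ [] then String.ofList result else "N"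

-- ===== PRECONDITION & SPEC =====
def Spec_solution (input_string : String) (out : String) : Prop := out = solution_alt input_string
instance (input_string : String) (out : String) : Decidable (Spec_solution input_string out) := by unfold Spec_solution; infer_instance

-- ===== CLAIM (what is proved, stated in full; the proofs are below) =====
def Claim_equal_solution : Prop := ∀ (input_string : String), Dom_solution input_string → Spec_solution input_string (solution input_string)

-- ===== LEMMAS AND PROOFS =====

-- the consecutive-duplicate compression of l given a previous character p
def compressFrom (p : Option Char) : List Char → List Char
  | [] => []
  | c :: l => if p = some c then compressFrom p l else c :: compressFrom (some c) l

-- the value of `prev` after A's loop over l starting from p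
def prevAfter (p : Option Char) : List Char → Option Char
  | [] => p
  | c :: l => prevAfter (some c) l

-- A's loop body on the compressed stream (prev dropped)
def aCore (st : PySem.Dict Char Int × List Char) (c : Char) : PySem.Dict Char Int × List Char :=
  if st.1.contains c = false then (st.1.insert c 1, st.2)
  else
    let d' := st.1.modify c 0 (· + 1)
    if d'.getD c 0 = 2 then (d', st.2 ++ [c]) else (d', st.2)

lemma foldA_eq (l : List Char) (dic : PySem.Dict Char Int) (ans : List Char) (prev : Option Char) :
    List.foldl aStep (dic, ans, prev) l =
      ((List.foldl aCore (dic, ans) (compressFrom prev l)).1,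
       (List.foldl aCore (dic, ans) (compressFrom prev l)).2,
       prevAfter prev l) := by
  induction l generalizing dic ans prev with
  | nil => simp [compressFrom, prevAfter]
  | cons c l ih =>
    by_cases h : prev = some c
    · subst h
      simp only [List.foldl_cons, compressFrom, prevAfter, if_true]
      have : aStep (dic, ans, some c) c = (dic, ans, some c) := by simp [aStep]
      rw [this, ih]
    · simp only [List.foldl_cons, compressFrom, prevAfter, if_neg h]
      have : aStep (dic, ans, prev) c = ((aCore (dic, ans) c).1, (aCore (dic, ans) c).2, some c) := by
        simp only [aStep, aCore, if_neg h]
        split_ifs <;> rfl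
      rw [this, ih]

lemma countcat (t : List Char) (c c' : Char) :
    (t ++ [c]).count c' = t.count c' + if c = c' then 1 else 0 := by
  simp [List.count_append, List.count_singleton]

-- loop invariant for A's core over any stream m, with t the already-processed prefix
lemma aCore_inv (m t : List Char) (dic : PySem.Dict Char Int) (ans : List Char)
    (hd : ∀ c, dic.getD c 0 = (t.count c : Int))
    (hc : ∀ c, dic.contains c = true ↔ c ∈ t)
    (hn : ans.Nodup)
    (hm : ∀ c, c ∈ ans ↔ 2 ≤ t.count c) :
    (List.foldl aCore (dic, ans) m).2.Nodup ∧
      (∀ c, c ∈ (List.foldl aCore (dic, ans) m).2 ↔ 2 ≤ (t ++ m).count c) := by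
  induction m generalizing t dic ans with
  | nil => simpa using ⟨hn, hm⟩
  | cons c m ih =>
    rw [List.foldl_cons]
    have key : ∀ (dic' : PySem.Dict Char Int) (ans' : List Char),
        (∀ c', dic'.getD c' 0 = ((t ++ [c]).count c' : Int)) →
        (∀ c', dic'.contains c' = true ↔ c' ∈ t ++ [c]) →
        ans'.Nodup → (∀ c', c' ∈ ans' ↔ 2 ≤ (t ++ [c]).count c') →
        (List.foldl aCore (dic', ans') m).2.Nodup ∧
          ∀ c', c' ∈ (List.foldl aCore (dic', ans') m).2 ↔ 2 ≤ (t ++ c :: m).count c' := by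
      intro dic' ans' h1 h2 h3 h4
      have := ih (t ++ [c]) dic' ans' h1 h2 h3 h4
      simpa [List.append_assoc] using this
    by_cases h : dic.contains c = true
    · have hmem : c ∈ t := (hc c).1 h
      have hpos : 0 < t.count c := List.count_pos_iff.2 hmem
      have hgd : (dic.modify c 0 (· + 1)).getD c 0 = (t.count c : Int) + 1 := by
        rw [PySem.Dict.getD_modify_self, hd]
      by_cases h2 : t.count c = 1
      · have hstep : aCore (dic, ans) c = (dic.modify c 0 (· + 1), ans ++ [c]) := by
          simp [aCore, h, hgd, h2]
        rw [hstep]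
        have hno : c ∉ ans := fun hin => by have := (hm c).1 hin; omega
        refine key _ _ ?_ ?_ ?_ ?_
        · intro c'
          rw [PySem.Dict.getD_modify, countcat]
          by_cases hcc : c' = c
          · subst hcc
            rw [if_pos rfl, if_pos rfl, hd]
            push_cast; ring
          · rw [if_neg hcc, if_neg (fun hh => hcc hh.symm), hd]
            simp
        · intro c'
          rw [PySem.Dict.contains_modify]
          by_cases hcc : c' = c
          · subst hcc; simp [hmem]
          · simp [hcc, hc c']
        · simp only [List.nodup_append, List.nodup_singleton, true_and]
          refine ⟨hn, ?_⟩
          intro a ha b hb hab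
          rw [List.mem_singleton] at hb
          exact hno (by rwa [hab, hb] at ha)
        · intro c'
          rw [countcat]
          by_cases hcc : c = c'
          · subst hcc
            simp [h2]
          · simp only [if_neg hcc, List.mem_append, List.mem_singleton, Ne.symm hcc,
              or_false, hm c']
            omega
      · have hne : ¬(dic.getD c 0 + 1 = 2) := by rw [hd]; omega
        have hstep : aCore (dic, ans) c = (dic.modify c 0 (· + 1), ans) := by
          simp [aCore, h, hne]
        rw [hstep]
        refine key _ _ ?_ ?_ hn ?_
        · intro c'
          rw [PySem.Dict.getD_modify, countcat]
          by_cases hcc : c' = c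
          · subst hcc
            rw [if_pos rfl, if_pos rfl, hd]
            push_cast; ring
          · rw [if_neg hcc, if_neg (fun hh => hcc hh.symm), hd]
            simp
        · intro c'
          rw [PySem.Dict.contains_modify]
          by_cases hcc : c' = c
          · subst hcc; simp [hmem]
          · simp [hcc, hc c']
        · intro c'
          rw [countcat]
          by_cases hcc : c = c'
          · subst hcc
            rw [if_pos rfl, hm c]
            omega
          · simp only [if_neg hcc, hm c']
            omega
    · have hnm : c ∉ t := fun hin => h ((hc c).2 hin)
      have h0 : t.count c = 0 := List.count_eq_zero.2 hnm
      have hstep : aCore (dic, ans) c = (dic.insert c 1, ans) := by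
        simp only [aCore, Bool.not_eq_true] at *
        simp [h]
      rw [hstep]
      refine key _ _ ?_ ?_ hn ?_
      · intro c'
        rw [PySem.Dict.getD_insert, countcat]
        by_cases hcc : c' = c
        · subst hcc
          rw [if_pos rfl, if_pos rfl, h0]
          simp
        · rw [if_neg hcc, if_neg (fun hh => hcc hh.symm), hd]
          simp
      · intro c'
        rw [PySem.Dict.contains_insert]
        by_cases hcc : c' = c
        · subst hcc; simp
        · simp [hcc, hc c']
      · intro c'
        rw [countcat]
        by_cases hcc : c = c'
        · subst hcc
          rw [if_pos rfl, hm c, h0]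
          omega
        · simp only [if_neg hcc, hm c']
          omega

-- generalized run-start counter: the i = 0 case compares against an explicit previous char p
def idxC (p : Option Char) (l : List Char) (c : Char) : Nat :=
  (List.range l.length).countP
    (fun i => decide (l[i]? = some c ∧ (if i = 0 then p else l[i-1]?) ≠ some c))

lemma bStarts_eq_idxC (l : List Char) (c : Char) : bStarts l c = idxC none l c := by
  unfold bStarts idxC
  apply List.countP_congr
  intro i _
  cases i <;> simp

lemma idxC_cons (p : Option Char) (c' : Char) (t : List Char) (c : Char) :
    idxC p (c' :: t) c = (if c' = c ∧ p ≠ some c then 1 else 0) + idxC (some c') t c := by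
  unfold idxC
  rw [List.length_cons, List.range_succ_eq_map, List.countP_cons, List.countP_map]
  have hcong : List.countP
      ((fun i => decide ((c' :: t)[i]? = some c ∧ (if i = 0 then p else (c' :: t)[i-1]?) ≠ some c)) ∘ Nat.succ)
      (List.range t.length) =
      List.countP (fun i => decide (t[i]? = some c ∧ (if i = 0 then some c' else t[i-1]?) ≠ some c))
      (List.range t.length) := by
    apply List.countP_congr
    intro i _
    cases i <;> simp
  have hpred : decide ((c' :: t)[0]? = some c ∧ (if (0:Nat) = 0 then p else (c' :: t)[0-1]?) ≠ some c) =
      decide (c' = c ∧ p ≠ some c) := by simp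
  rw [hcong, hpred]
  by_cases h : c' = c ∧ p ≠ some c
  · simp [h]
    omega
  · simp [h]

lemma idxC_eq_count (l : List Char) (p : Option Char) (c : Char) :
    idxC p l c = (compressFrom p l).count c := by
  induction l generalizing p with
  | nil => simp [idxC, compressFrom]
  | cons c' t ih =>
    rw [idxC_cons, compressFrom]
    by_cases hp : p = some c'
    · subst hp
      have h0 : (if c' = c ∧ (some c' : Option Char) ≠ some c then 1 else 0) = 0 := by
        by_cases hcc : c' = c
        · simp [hcc]
        · simp [hcc]
      rw [if_pos rfl, h0, ih]
      simp
    · rw [if_neg hp, ih, List.count_cons]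
      by_cases hcc : c' = c
      · subst hcc
        rw [if_pos (⟨rfl, hp⟩ : c' = c' ∧ p ≠ some c')]
        simp
        omega
      · simp [hcc]

lemma mem_compressFrom {c : Char} (p : Option Char) (l : List Char) :
    c ∈ compressFrom p l → c ∈ l := by
  induction l generalizing p with
  | nil => simp [compressFrom]
  | cons c' t ih =>
    rw [compressFrom]
    split_ifs with h
    · intro hm; exact List.mem_cons_of_mem _ (ih p hm)
    · intro hm
      rcases List.mem_cons.1 hm with rfl | hm
      · exact List.mem_cons_self
      · exact List.mem_cons_of_mem _ (ih (some c') hm)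

-- ===== VERDICT (by name: the statement is the Claim_ definition above) =====
theorem solution_spec : Claim_equal_solution := by
  intro s _
  show solution s = solution_alt s
  simp only [solution, solution_alt]
  rw [foldA_eq]
  set L := s.toList with hL
  set m := compressFrom none L with hm
  have hA := aCore_inv m [] PySem.Dict.empty []
    (by simp) (by simp) List.nodup_nil (by simp)
  simp only [List.nil_append] at hA
  set ansA := (List.foldl aCore (PySem.Dict.empty, []) m).2 with hansA
  have hcount : ∀ c, bStarts L c = m.count c := fun c => by
    rw [bStarts_eq_idxC, idxC_eq_count]
  set target := (PySem.List.sorted (PySem.Set.ofList L) (fun x => x) false).filter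
    (fun c => decide (2 ≤ bStarts L c)) with htarget
  have hlt : target.Pairwise (· < ·) :=
    (PySem.List.sorted_ofList_pairwise_lt L).filter _
  have hnt : target.Nodup := hlt.imp (fun h => ne_of_lt h)
  have hmt : ∀ c, c ∈ target ↔ 2 ≤ m.count c := by
    intro c
    rw [htarget, List.mem_filter]
    simp only [PySem.List.mem_sorted, PySem.Set.mem_ofList, decide_eq_true_eq, hcount c]
    constructor
    · rintro ⟨-, h⟩; exact h
    · intro h
      refine ⟨mem_compressFrom none L (by rw [← hm]; exact List.count_pos_iff.1 (by omega)), h⟩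
  have hperm : target.Perm ansA :=
    (List.perm_ext_iff_of_nodup hnt hA.1).2 (fun c => by rw [hmt c, hA.2 c])
  have hsorted : PySem.List.sorted ansA (fun x => x) false = target :=
    PySem.List.sorted_eq_of_perm_of_pairwise_lt ansA target (fun x => x) hperm hlt
  by_cases hnil : ansA = []
  · have ht0 : target = [] := (hnil ▸ hperm).eq_nil
    rw [if_pos (by simp [hnil]), if_neg (by simp [ht0])]
  · have ht1 : target ≠ [] := fun he => hnil ((he ▸ hperm).symm.eq_nil)
    rw [if_neg (by simpa [List.length_eq_zero_iff] using hnil), if_pos (by simpa using ht1),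
        hsorted]
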